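-- pv_equiv track=rewrite | github.com/ShawnDong98/Algorithm-Book | huawei/19. 剩余银饰的重量.py | func
-- ===== SOURCE A (Python) =====
-- def func(weights):
--     sorted_weights = sorted(weights, key=lambda x: -x)
--
--     while len(sorted_weights) >= 3:
--         x = sorted_weights.pop(0)
--         y = sorted_weights.pop(0)
--         z = sorted_weights.pop(0)
--         if x == y and y == z:
--             continue
--         elif x == y and y != z:
--             sorted_weights.append(abs(z - y))
--             sorted_weights.sort(key=lambda x: -x)
--         elif x != y and y == z:
--             sorted_weights.append(abs(y - x))
--             sorted_weights.sort(key=lambda x: -x)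
--         elif x != y and y != z:
--             sorted_weights.append(abs(z - y) - abs(y - x))
--             sorted_weights.sort(key=lambda x: -x)
--
--     if sorted_weights:
--         return max(sorted_weights)
--     else:
--         return 0
-- ===== SOURCE B (Python) =====
-- def func(weights):
--     # Unsorted bag: no sorting at all; each round removes the three heaviest by
--     # linear max-scans and drops the residual back in (two cases instead of four).
--     bag = list(weights)
--     while len(bag) >= 3:
--         x = bag.pop(bag.index(max(bag)))
--         y = bag.pop(bag.index(max(bag)))
--         z = bag.pop(bag.index(max(bag)))
--         if x == y == z:
--             continue
--         bag.append(x - y if y == z else (y - z) - (x - y))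
--     return max(bag) if bag else 0
-- ===== Notes on version B (the rewrite author's own statement) =====
-- stated objective: simpler
-- what changed: B keeps an unsorted bag and never sorts: each round it removes the three heaviest by pop(index(max(bag))) linear scans and appends the residual, with the four abs-based cases collapsed to two sign-free ones; A maintains a descending sorted list and re-sorts after every append.
import Mathlib
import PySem

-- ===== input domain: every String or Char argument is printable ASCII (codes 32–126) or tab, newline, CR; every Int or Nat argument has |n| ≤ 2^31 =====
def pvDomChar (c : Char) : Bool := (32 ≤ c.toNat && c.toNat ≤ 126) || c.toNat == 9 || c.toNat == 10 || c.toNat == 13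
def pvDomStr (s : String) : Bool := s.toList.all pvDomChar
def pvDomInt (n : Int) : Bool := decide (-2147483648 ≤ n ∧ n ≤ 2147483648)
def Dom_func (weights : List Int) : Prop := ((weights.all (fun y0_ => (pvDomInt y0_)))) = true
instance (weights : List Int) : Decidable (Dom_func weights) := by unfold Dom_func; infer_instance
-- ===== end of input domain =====

-- B keeps an unsorted bag and never sorts: three pop(index(max)) scans per round and a
-- two-case sign-free residual, instead of A's sorted list with a re-sort after every append.

-- ===== PORT A =====
-- sorted(weights, key=lambda x: -x)
def sortNegKey (l : List Int) : List Int := PySem.List.sorted l (fun x => -x) false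

-- the while-loop of A: pop the first three, append the combined weight, full re-sort
def funcLoop (ws : List Int) : List Int :=
  match ws with
  | x :: y :: z :: rest =>
    if x = y ∧ y = z then funcLoop rest
    else if x = y ∧ y ≠ z then funcLoop (sortNegKey (rest ++ [|z - y|]))
    else if x ≠ y ∧ y = z then funcLoop (sortNegKey (rest ++ [|y - x|]))
    else if x ≠ y ∧ y ≠ z then funcLoop (sortNegKey (rest ++ [|z - y| - |y - x|]))
    else funcLoop rest   -- unreachable final fall-through of Python's elif chain
  | ws => ws
termination_by ws.length
decreasing_by all_goals (simp only [sortNegKey, PySem.List.length_sorted, List.length_append,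
  List.length_cons, List.length_nil]; omega)

def func (weights : List Int) : Int :=
  if funcLoop (sortNegKey weights) = [] then 0
  else (PySem.List.max? (funcLoop (sortNegKey weights)) (fun w => w)).getD 0

-- ===== PORT B =====
-- bag.pop(bag.index(max(bag))): max, then first index of it, then pop there; inside the
-- loop the bag is nonempty, so the three option-returning steps always succeed and the
-- fall-through (0, bag) is unreachable
def popMax (bag : List Int) : Int × List Int :=
  match PySem.List.max? bag (fun w => w) with
  | none => (0, bag)
  | some m =>
    match PySem.List.index? bag m with
    | none => (0, bag)
    | some i =>
      match PySem.List.pop? bag (i : Int) with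
      | none => (0, bag)
      | some (v, rest) => (v, rest)

theorem popMax_length (bag : List Int) (h : bag ≠ []) :
    (popMax bag).2.length + 1 = bag.length := by
  unfold popMax
  cases hm : PySem.List.max? bag (fun w => w) with
  | none => exact absurd ((PySem.List.max?_eq_none_iff _ _).mp hm) h
  | some m =>
    have hmem : m ∈ bag := PySem.List.max?_mem hm
    cases hi : PySem.List.index? bag m with
    | none => exact absurd ((PySem.List.index?_eq_none_iff _ _).mp hi) (by simp [hmem])
    | some i =>
      obtain ⟨hk, _, _⟩ := PySem.List.getElem_of_index?_eq_some hi
      simp only [hi, PySem.List.pop?_natCast bag i hk]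
      show (bag.eraseIdx i).length + 1 = bag.length
      simp only [List.length_eraseIdx]
      rw [if_pos hk]
      omega

-- the while-loop of Source B on the unsorted bag
def bagLoop (bag : List Int) : List Int :=
  if _h3 : 3 ≤ bag.length then
    let p1 := popMax bag
    let p2 := popMax p1.2
    let p3 := popMax p2.2
    if p1.1 = p2.1 ∧ p2.1 = p3.1 then bagLoop p3.2
    else bagLoop (p3.2 ++ [if p2.1 = p3.1 then p1.1 - p2.1 else (p2.1 - p3.1) - (p1.1 - p2.1)])
  else bag
termination_by bag.length
decreasing_by
  all_goals
    have h1 := popMax_length bag (List.ne_nil_of_length_pos (by omega))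
    have h2 := popMax_length (popMax bag).2 (List.ne_nil_of_length_pos (by omega))
    have h3' := popMax_length (popMax (popMax bag).2).2 (List.ne_nil_of_length_pos (by omega))
    first
    | (simp only [List.length_append, List.length_cons, List.length_nil]; omega)
    | omega

def func_alt (weights : List Int) : Int :=
  if bagLoop weights = [] then 0
  else (PySem.List.max? (bagLoop weights) (fun w => w)).getD 0

-- ===== PRECONDITION & SPEC =====
def Spec_func (weights : List Int) (out : Int) : Prop := out = func_alt weights
instance (weights : List Int) (out : Int) : Decidable (Spec_func weights out) := by unfold Spec_func; infer_instance

-- ===== CLAIM (what is proved, stated in full; the proofs are below) =====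
def Claim_equal_func : Prop := ∀ (weights : List Int), Dom_func weights → Spec_func weights (func weights)

-- ===== LEMMAS AND PROOFS =====

theorem sortNegKey_pairwise (l : List Int) :
    (sortNegKey l).Pairwise (fun a b => b ≤ a) := by
  have := PySem.List.sorted_pairwise (xs := l) (key := fun x => -x)
  exact this.imp (by intro a b h; omega)

theorem sortNegKey_perm (l : List Int) : (sortNegKey l).Perm l :=
  PySem.List.sorted_perm (xs := l) (key := fun x => -x) (rev := false)

-- two maximal elements of permuted lists are equal as values
theorem max_val_perm {a : List Int} {b : List Int} (hp : a.Perm b)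
    {x y : Int} (hx : x ∈ a) (hy : y ∈ b)
    (hxa : ∀ w ∈ a, w ≤ x) (hyb : ∀ w ∈ b, w ≤ y) : x = y := by
  have h1 := hyb x (hp.mem_iff.mp hx)
  have h2 := hxa y (hp.mem_iff.mpr hy)
  omega

-- the value returned by max(...) is permutation-invariant
theorem max?_getD_perm {a b : List Int} (hp : a.Perm b) :
    (PySem.List.max? a (fun w => w)).getD 0 = (PySem.List.max? b (fun w => w)).getD 0 := by
  cases ha : PySem.List.max? a (fun w => w) with
  | none =>
    have : a = [] := (PySem.List.max?_eq_none_iff _ _).mp ha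
    subst this
    have : b = [] := hp.symm.eq_nil
    subst this; rfl
  | some m =>
    cases hb : PySem.List.max? b (fun w => w) with
    | none =>
      have : b = [] := (PySem.List.max?_eq_none_iff _ _).mp hb
      subst this
      have : a = [] := hp.eq_nil
      subst this
      simp [PySem.List.max?] at ha
    | some n =>
      simp only [Option.getD_some]
      exact max_val_perm hp (PySem.List.max?_mem ha) (PySem.List.max?_mem hb)
        (PySem.List.max?_isMax ha) (PySem.List.max?_isMax hb)

theorem eraseIdx_append_cons (pre suf : List Int) (a : Int) :
    (pre ++ a :: suf).eraseIdx pre.length = pre ++ suf := by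
  induction pre with
  | nil => simp
  | cons p ps ih => simp [ih]

-- popMax on a bag permuting a descending-sorted m :: t pops the value m and leaves a
-- permutation of t
theorem popMax_spec {bag : List Int} {m : Int} {t : List Int}
    (hp : bag.Perm (m :: t)) (hs : (m :: t).Pairwise (fun a b => b ≤ a)) :
    (popMax bag).1 = m ∧ (popMax bag).2.Perm t := by
  have hbag_ne : bag ≠ [] := by
    intro hh; subst hh; exact absurd hp.symm.eq_nil (by simp)
  unfold popMax
  cases hm : PySem.List.max? bag (fun w => w) with
  | none => exact absurd ((PySem.List.max?_eq_none_iff _ _).mp hm) hbag_ne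
  | some M =>
    have hMmem : M ∈ bag := PySem.List.max?_mem hm
    have hMmax : ∀ w ∈ bag, w ≤ M := PySem.List.max?_isMax hm
    have hmt_max : ∀ w ∈ m :: t, w ≤ m := by
      intro w hw
      rcases List.mem_cons.mp hw with rfl | hw'
      · exact le_refl w
      · exact (List.pairwise_cons.mp hs).1 w hw'
    have hMm : M = m := max_val_perm hp hMmem (by simp) hMmax hmt_max
    subst hMm
    cases hi : PySem.List.index? bag M with
    | none => exact absurd ((PySem.List.index?_eq_none_iff _ _).mp hi) (by simp [hMmem])
    | some i =>
      obtain ⟨hk, hgk, _⟩ := PySem.List.getElem_of_index?_eq_some hi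
      simp only [hi, PySem.List.pop?_natCast bag i hk]
      refine ⟨hgk, ?_⟩
      show (bag.eraseIdx i).Perm t
      obtain ⟨pre, suf, hbag, hlen, -⟩ := (PySem.List.index?_eq_some_iff _ _ _).mp hi
      subst hbag; subst hlen
      rw [eraseIdx_append_cons]
      have hmid : (pre ++ M :: suf).Perm (M :: (pre ++ suf)) := List.perm_middle
      exact (hmid.symm.trans hp).cons_inv

-- main loop relation: on a bag permuting a descending-sorted list s, B's loop result is a
-- permutation of A's loop result
theorem loop_rel (n : Nat) : ∀ (bag s : List Int), bag.length ≤ n → bag.Perm s →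
    s.Pairwise (fun a b => b ≤ a) → (bagLoop bag).Perm (funcLoop s) := by
  induction n with
  | zero =>
    intro bag s hlen hp hs
    have : bag = [] := List.length_eq_zero_iff.mp (Nat.le_zero.mp hlen)
    subst this
    have : s = [] := hp.symm.eq_nil
    subst this
    rw [bagLoop, funcLoop] <;> simp
  | succ n ih =>
    intro bag s hlen hp hs
    rw [bagLoop]
    by_cases h3 : 3 ≤ bag.length
    · rw [dif_pos h3]
      have hslen : 3 ≤ s.length := by have := hp.length_eq; omega
      match s, hs with
      | x :: y :: z :: rest, hs =>
        have hxy : y ≤ x := (List.pairwise_cons.mp hs).1 y (by simp)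
        have hyz : z ≤ y :=
          (List.pairwise_cons.mp (List.pairwise_cons.mp hs).2).1 z (by simp)
        have hs2 : (y :: z :: rest).Pairwise (fun a b => b ≤ a) :=
          (List.pairwise_cons.mp hs).2
        have hs3 : (z :: rest).Pairwise (fun a b => b ≤ a) :=
          (List.pairwise_cons.mp hs2).2
        have hs4 : rest.Pairwise (fun a b => b ≤ a) := (List.pairwise_cons.mp hs3).2
        obtain ⟨he1, hp1⟩ := popMax_spec hp hs
        obtain ⟨he2, hp2⟩ := popMax_spec hp1 hs2
        obtain ⟨he3, hp3⟩ := popMax_spec hp2 hs3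
        simp only [he1, he2, he3]
        have hex : (popMax (popMax (popMax bag).2).2).2.length + 3 = bag.length := by
          have h0 := hp.length_eq
          have h1 := hp1.length_eq
          have h2 := hp2.length_eq
          have h3' := hp3.length_eq
          simp only [List.length_cons] at h0 h1 h2 h3'
          omega
        have hlenr : (popMax (popMax (popMax bag).2).2).2.length ≤ n := by omega
        rw [funcLoop]
        by_cases hxyE : x = y <;> by_cases hyzE : y = z
        · rw [if_pos ⟨hxyE, hyzE⟩, if_pos ⟨hxyE, hyzE⟩]
          exact ih _ rest hlenr hp3 hs4
        · rw [if_neg (show ¬(x = y ∧ y = z) by tauto),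
            if_neg (show ¬(x = y ∧ y = z) by tauto),
            if_pos (⟨hxyE, hyzE⟩ : x = y ∧ y ≠ z), if_neg hyzE]
          have habs : |z - y| = y - z := by
            rw [abs_sub_comm]; exact abs_of_nonneg (by omega)
          have hvv : (y - z) - (x - y) = y - z := by omega
          rw [habs, hvv]
          refine ih _ (sortNegKey (rest ++ [y - z])) ?_ ?_ (sortNegKey_pairwise _)
          · simp only [List.length_append, List.length_cons, List.length_nil]; omega
          · exact (hp3.append_right [y - z]).trans (sortNegKey_perm _).symm
        · rw [if_neg (show ¬(x = y ∧ y = z) by tauto),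
            if_neg (show ¬(x = y ∧ y = z) by tauto),
            if_neg (show ¬(x = y ∧ y ≠ z) by tauto),
            if_pos (⟨hxyE, hyzE⟩ : x ≠ y ∧ y = z), if_pos hyzE]
          have habs : |y - x| = x - y := by
            rw [abs_sub_comm]; exact abs_of_nonneg (by omega)
          rw [habs]
          refine ih _ (sortNegKey (rest ++ [x - y])) ?_ ?_ (sortNegKey_pairwise _)
          · simp only [List.length_append, List.length_cons, List.length_nil]; omega
          · exact (hp3.append_right [x - y]).trans (sortNegKey_perm _).symm
        · rw [if_neg (show ¬(x = y ∧ y = z) by tauto),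
            if_neg (show ¬(x = y ∧ y = z) by tauto),
            if_neg (show ¬(x = y ∧ y ≠ z) by tauto),
            if_neg (show ¬(x ≠ y ∧ y = z) by tauto),
            if_pos (⟨hxyE, hyzE⟩ : x ≠ y ∧ y ≠ z), if_neg hyzE]
          have h1 : |z - y| = y - z := by
            rw [abs_sub_comm]; exact abs_of_nonneg (by omega)
          have h2 : |y - x| = x - y := by
            rw [abs_sub_comm]; exact abs_of_nonneg (by omega)
          rw [h1, h2]
          refine ih _ (sortNegKey (rest ++ [(y - z) - (x - y)])) ?_ ?_ (sortNegKey_pairwise _)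
          · simp only [List.length_append, List.length_cons, List.length_nil]; omega
          · exact (hp3.append_right [(y - z) - (x - y)]).trans (sortNegKey_perm _).symm
    · rw [dif_neg h3]
      have hslen : ¬ 3 ≤ s.length := by have := hp.length_eq; omega
      match s with
      | [] => rw [funcLoop] <;> simp_all
      | [a] => rw [funcLoop] <;> simp_all
      | [a, b] => rw [funcLoop] <;> simp_all
      | a :: b :: c :: t => simp at hslen

-- ===== VERDICT (by name: the statement is the Claim_ definition above) =====
theorem func_spec : Claim_equal_func := by
  intro weights _
  unfold Spec_func func func_alt
  have hperm : (bagLoop weights).Perm (funcLoop (sortNegKey weights)) :=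
    loop_rel weights.length weights (sortNegKey weights) le_rfl
      (sortNegKey_perm weights).symm (sortNegKey_pairwise weights)
  by_cases hnil : funcLoop (sortNegKey weights) = []
  · rw [if_pos hnil, if_pos (by rw [hnil] at hperm; exact hperm.eq_nil)]
  · rw [if_neg hnil, if_neg (by intro hh; rw [hh] at hperm; exact hnil hperm.symm.eq_nil)]
    exact max?_getD_perm hperm.symm
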